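-- pv_equiv track=rewrite | github.com/greatmastermario/adventofcode2021 | day17.py | optimizedmaxy
-- ===== SOURCE A (Python) =====
-- def optimizedmaxy(ytarget):
--     ymax = 0
--     startvelocity = 1
--     while True:
--         velocity = startvelocity
--         tempymax = 0
--         y = 0
--         while y >= ytarget[0]:
--             y += velocity
--             velocity -= 1
--             if velocity == 0:
--                 tempymax = y
--             elif y in range(ytarget[0], ytarget[1] + 1):
--                 ymax = max(ymax, tempymax)
--                 break
--         if velocity < ytarget[0]:
--             break
--         startvelocity += 1
--     return ymax
-- ===== SOURCE B (Python) =====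
-- def optimizedmaxy(ytarget):
--     # Closed form for A's velocity search.  A fires probes with start velocities
--     # 1, 2, 3, ... from y = 0.  If the target floor is above the start height
--     # (ytarget[0] >= 2) the very first probe ends below it and the search stops at
--     # once with 0; an empty range (ytarget[1] < ytarget[0]) can never register a
--     # hit, so the initial 0 is returned as well.  Otherwise (target below the
--     # axis) the best hitting velocity is -ytarget[0] - 1, whose apex is the
--     # triangular number n*(n+1)/2 of n = -ytarget[0] - 1.
--     lo, hi = ytarget[0], ytarget[1]
--     if lo >= 2 or hi < lo:
--         return 0
--     n = -lo - 1
--     return n * (n + 1) // 2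
-- ===== Notes on version B (the rewrite author's own statement) =====
-- stated objective: faster
-- what changed: Replaces A's double simulation loop (outer scan over start velocities, inner step-by-step probe flight) by an O(1) closed form: 0 when the target floor is above the start height or the range is empty, otherwise the triangular number (-ymin-1)*(-ymin)/2.
-- intended difference: On singleton below-axis targets with ytarget[0] = ytarget[1] <= -3 A's search stops two velocities short of the best shot and returns a smaller leftover value (e.g. 0 on [-3,-3]), while B returns (-ymin-1)*(-ymin)/2 (3 on [-3,-3]), the true apex of the probe with velocity -ymin-1, which lands exactly on ymin; B's value is the intended maximum height. — e.g. on optimizedmaxy([-3, -3]): A returns 0, B returns 3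
-- outside the precondition, e.g. on optimizedmaxy([5]): A returns 0, B raises IndexError; on optimizedmaxy([0]): A raises IndexError, B raises IndexError; on optimizedmaxy([1]): A does not finish within the time limit, B raises IndexError
import Mathlib
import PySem

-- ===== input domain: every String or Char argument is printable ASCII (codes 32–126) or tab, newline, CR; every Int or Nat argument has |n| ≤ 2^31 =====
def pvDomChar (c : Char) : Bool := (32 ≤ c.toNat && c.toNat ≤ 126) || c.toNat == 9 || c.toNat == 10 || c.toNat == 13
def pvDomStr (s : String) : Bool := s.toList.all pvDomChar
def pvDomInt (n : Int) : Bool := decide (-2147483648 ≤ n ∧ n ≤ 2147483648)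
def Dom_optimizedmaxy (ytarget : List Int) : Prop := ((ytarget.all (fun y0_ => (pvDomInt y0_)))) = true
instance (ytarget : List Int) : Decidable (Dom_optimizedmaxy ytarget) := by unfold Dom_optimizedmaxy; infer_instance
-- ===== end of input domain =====

-- B replaces A's two nested simulation loops by a closed form (0 for unreachable or
-- empty targets, else the triangular number of -ytarget[0]-1); equivalence is about
-- the return value (A mutates nothing).

-- ===== PORT A =====
-- inner `while y >= ytarget[0]` loop; state (y, velocity, tempymax, ymax), returns
-- (ymax, velocity) at exit/break.  Python's loop needs no fuel; the fuel is an upper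
-- bound on the steps actually taken on inputs where the Python terminates.
def innerA (a b : Int) : Nat → Int → Int → Int → Int → Int × Int
  | 0, _, velocity, _, ymax => (ymax, velocity)
  | fuel+1, y, velocity, tempymax, ymax =>
    if a ≤ y then
      if velocity - 1 = 0 then
        innerA a b fuel (y + velocity) (velocity - 1) (y + velocity) ymax
      else if a ≤ y + velocity ∧ y + velocity ≤ b then   -- y in range(ytarget[0], ytarget[1]+1)
        (max ymax tempymax, velocity - 1)                 -- ymax = max(ymax, tempymax); break
      else
        innerA a b fuel (y + velocity) (velocity - 1) tempymax ymax
    else (ymax, velocity)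

-- outer `while True` loop over startvelocity
def outerA (a b : Int) : Nat → Int → Int → Int
  | 0, _, ymax => ymax
  | fuel+1, startvelocity, ymax =>
    match innerA a b (startvelocity - a + 6).toNat 0 startvelocity 0 ymax with
    | (ymax2, v2) => if v2 < a then ymax2 else outerA a b fuel (startvelocity + 1) ymax2

def optimizedmaxy (ytarget : List Int) : Int :=
  match PySem.List.pyGet? ytarget 0, PySem.List.pyGet? ytarget 1 with
  | some a, some b => outerA a b (-a + 6).toNat 1 0
  | _, _ => 0

-- ===== PORT B =====
def optimizedmaxy_alt (ytarget : List Int) : Int :=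
  match PySem.List.pyGet? ytarget 0 with
  | none => 0
  | some lo =>
    match PySem.List.pyGet? ytarget 1 with
    | none => 0
    | some hi =>
      if 2 ≤ lo ∨ hi < lo then 0
      else PySem.Int.floordiv ((-lo - 1) * ((-lo - 1) + 1)) 2

-- ===== PRECONDITION & SPEC =====
-- Pre_ excludes: lists shorter than 2 (Python A raises IndexError, except that for
-- ytarget[0] ≥ 2 it returns 0 without ever reading ytarget[1], where B raises);
-- ytarget[0] = 1 (A loops forever); and targets with ytarget[0] ≤ 0 ≤ ytarget[1]:
-- such a target contains a point every start velocity hits, the supremum of apex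
-- heights is unbounded, so no finite answer is right and A's value (an artefact of
-- its stopping rule) and B's are equally arbitrary there.
def Pre_optimizedmaxy (ytarget : List Int) : Prop :=
  2 ≤ ytarget.length ∧ ytarget.getD 0 0 ≠ 1 ∧
    ¬(ytarget.getD 0 0 ≤ 0 ∧ 0 ≤ ytarget.getD 1 0)
instance (ytarget : List Int) : Decidable (Pre_optimizedmaxy ytarget) := by
  unfold Pre_optimizedmaxy; infer_instance
def pvWitness_optimizedmaxy : List Int := [-9, -5]

-- On singleton below-axis targets ytarget[0] = ytarget[1] ≤ -3 A's search stops two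
-- velocities short of the best shot and returns a smaller leftover value (e.g. 0 on
-- [-3,-3]); B returns (-ymin-1)*(-ymin)/2 (3 on [-3,-3]), the apex of the probe with
-- start velocity -ymin-1, which lands exactly on ymin — the intended maximum height.
def D_optimizedmaxy (ytarget : List Int) : Prop :=
  2 ≤ ytarget.length ∧ ytarget.getD 0 0 = ytarget.getD 1 0 ∧ ytarget.getD 0 0 ≤ -3
instance (ytarget : List Int) : Decidable (D_optimizedmaxy ytarget) := by
  unfold D_optimizedmaxy; infer_instance

def Spec_optimizedmaxy (ytarget : List Int) (out : Int) : Prop :=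
  ¬ D_optimizedmaxy ytarget → out = optimizedmaxy_alt ytarget
instance (ytarget : List Int) (out : Int) : Decidable (Spec_optimizedmaxy ytarget out) := by
  unfold Spec_optimizedmaxy; infer_instance

def pvDiffWitness_optimizedmaxy : List Int := [-3, -3]
def pvDiffWitnessOut_optimizedmaxy : Int × Int := (0, 3)

-- ===== CLAIM (what is proved, stated in full; the proofs are below) =====
def Claim_unchanged_optimizedmaxy : Prop := ∀ (ytarget : List Int), Dom_optimizedmaxy ytarget → Pre_optimizedmaxy ytarget → Spec_optimizedmaxy ytarget (optimizedmaxy ytarget)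
def Claim_changed_optimizedmaxy : Prop := Dom_optimizedmaxy (pvDiffWitness_optimizedmaxy) ∧ Pre_optimizedmaxy (pvDiffWitness_optimizedmaxy) ∧ D_optimizedmaxy (pvDiffWitness_optimizedmaxy) ∧ optimizedmaxy (pvDiffWitness_optimizedmaxy) = pvDiffWitnessOut_optimizedmaxy.1 ∧ optimizedmaxy_alt (pvDiffWitness_optimizedmaxy) = pvDiffWitnessOut_optimizedmaxy.2 ∧ pvDiffWitnessOut_optimizedmaxy.1 ≠ pvDiffWitnessOut_optimizedmaxy.2
def Claim_exact_optimizedmaxy : Prop := ∀ (ytarget : List Int), Dom_optimizedmaxy ytarget → Pre_optimizedmaxy ytarget → D_optimizedmaxy ytarget → optimizedmaxy ytarget ≠ optimizedmaxy_alt ytarget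

-- ===== LEMMAS AND PROOFS =====

-- list-head bridges
lemma optimizedmaxy_cons (a b : Int) (l : List Int) :
    optimizedmaxy (a :: b :: l) = outerA a b (-a + 6).toNat 1 0 := by
  simp [optimizedmaxy]

lemma optimizedmaxy_alt_cons (a b : Int) (l : List Int) :
    optimizedmaxy_alt (a :: b :: l) =
      if 2 ≤ a ∨ b < a then 0 else PySem.Int.floordiv ((-a - 1) * ((-a - 1) + 1)) 2 := by
  simp [optimizedmaxy_alt]

lemma floordiv_half (n r : Int) (h : 2 * r = n * (n + 1)) :
    PySem.Int.floordiv (n * (n + 1)) 2 = r := by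
  rw [PySem.Int.floordiv_eq_iff_of_pos (by norm_num)]
  omega

-- empty target range: the elif never fires, ymax is never changed
lemma innerA_nohit (a b : Int) (hba : b < a) :
    ∀ (fuel : Nat) (y v t ymax : Int), ∃ vf, innerA a b fuel y v t ymax = (ymax, vf) := by
  intro fuel
  induction fuel with
  | zero => intro y v t ymax; exact ⟨v, rfl⟩
  | succ n ih =>
    intro y v t ymax
    simp only [innerA]
    by_cases h1 : a ≤ y
    · rw [if_pos h1]
      by_cases h2 : v - 1 = 0
      · rw [if_pos h2]; exact ih _ _ _ _
      · rw [if_neg h2, if_neg (by omega)]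
        exact ih _ _ _ _
    · rw [if_neg h1]; exact ⟨v, rfl⟩

lemma outerA_nohit (a b : Int) (hba : b < a) :
    ∀ (fuel : Nat) (sv ymax : Int), outerA a b fuel sv ymax = ymax := by
  intro fuel
  induction fuel with
  | zero => intro sv ymax; rfl
  | succ n ih =>
    intro sv ymax
    simp only [outerA]
    obtain ⟨vf, hv⟩ := innerA_nohit a b hba (sv - a + 6).toNat 0 sv 0 ymax
    rw [hv]
    by_cases h : vf < a
    · rw [if_pos h]
    · rw [if_neg h]; exact ih _ _

-- target floor above the start height: the first probe stops at once
lemma outerA_high (a b : Int) (ha : 2 ≤ a) :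
    ∀ (fuel : Nat), outerA a b fuel 1 0 = 0 := by
  intro fuel
  cases fuel with
  | zero => rfl
  | succ n =>
    simp only [outerA]
    have hinner : innerA a b (1 - a + 6).toNat 0 1 0 0 = (0, 1) := by
      cases h : (1 - a + 6).toNat with
      | zero => rfl
      | succ m => simp only [innerA]; rw [if_neg (by omega)]
    rw [hinner]
    simp only [if_pos (by omega : (1:Int) < a)]

-- ascent: from any rising state the loop reaches the start of the descent with
-- tempymax set to the apex T(sv) (2*t = sv*(sv+1)) and without a hit
lemma innerA_ascent (a b sv : Int) (ha : a ≤ 0) (hb : b ≤ -1) (hsv : 1 ≤ sv) :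
    ∀ (fuel : Nat) (y v ymax : Int), 1 ≤ v → v ≤ sv →
      2 * y = sv * (sv + 1) - v * (v + 1) →
      v + 2 ≤ (fuel : Int) →
      ∃ (fuel' : Nat) (t : Int), (fuel' : Int) = (fuel : Int) - (v + 1) ∧
        2 * t = sv * (sv + 1) ∧
        innerA a b fuel y v 0 ymax = innerA a b fuel' t (-1) t ymax := by
  intro fuel
  induction fuel with
  | zero => intro y v ymax h1 h2 h3 h4; exfalso; omega
  | succ n ih =>
    intro y v ymax h1 h2 hinv hfuel
    have hvsq : v * (v + 1) ≤ sv * (sv + 1) := by nlinarith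
    have hy0 : 0 ≤ y := by omega
    simp only [innerA]
    rw [if_pos (by omega : a ≤ y)]
    by_cases hv1 : v = 1
    · subst hv1
      rw [if_pos (by omega : (1:Int) - 1 = 0)]
      -- state (y+1, 0, y+1): one more step to (y+1, -1, y+1)
      obtain ⟨m, rfl⟩ : ∃ m, n = m + 1 := ⟨n - 1, by omega⟩
      have ht : 2 * (y + 1) = sv * (sv + 1) := by omega
      refine ⟨m, y + 1, by push_cast; omega, ht, ?_⟩
      simp only [innerA]
      norm_num
      rw [if_pos (by omega : a ≤ y + 1)]
      rw [if_neg (by omega : ¬(a ≤ y + 1 ∧ y < b))]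
    · -- v ≥ 2 : still ascending
      have hv2 : 2 ≤ v := by omega
      rw [if_neg (by omega : ¬(v - 1 = 0))]
      have hy2 : sv ≤ y + v := by nlinarith
      rw [if_neg (by omega : ¬(a ≤ y + v ∧ y + v ≤ b))]
      obtain ⟨fuel', t, hf, ht, heq⟩ :=
        ih (y + v) (v - 1) ymax (by omega) (by omega) (by ring_nf; ring_nf at hinv ⊢; omega) (by push_cast at hfuel ⊢; omega)
      exact ⟨fuel', t, by push_cast at hf ⊢; omega, ht, heq⟩

-- descent for a middle start velocity (sv ≤ -a-2) on a target a < b ≤ -1: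
-- the loop stops (exit or break) with final velocity ≥ a, and ymax grows at most to
-- max ymax t
lemma innerA_descent_mid (a b sv : Int) (hab : a < b) (hb : b ≤ -1) (hsv : 1 ≤ sv)
    (hsv2 : sv ≤ -a - 2) :
    ∀ (fuel : Nat) (y v t ymax : Int), v ≤ -1 → a ≤ v →
      2 * y = sv * (sv + 1) - v * (v + 1) → 2 * t = sv * (sv + 1) →
      ¬(a ≤ y ∧ y ≤ b) →
      v - a + 2 ≤ (fuel : Int) →
      ∃ r vf, innerA a b fuel y v t ymax = (r, vf) ∧ a ≤ vf ∧ ymax ≤ r ∧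
        (r = ymax ∨ r = max ymax t) := by
  intro fuel
  induction fuel with
  | zero => intro y v t ymax h1 h2 h3 h4 h5 h6; exfalso; omega
  | succ n ih =>
    intro y v t ymax hv1 hva hinv ht hnohit hfuel
    simp only [innerA]
    by_cases hy : a ≤ y
    · rw [if_pos hy]
      rw [if_neg (by omega : ¬(v - 1 = 0))]
      -- v = a is impossible here: then y would lie in [a, b]
      have hvna : a + 1 ≤ v := by
        rcases eq_or_lt_of_le hva with h | h
        · exfalso
          have h2y : 2 * y = sv * (sv + 1) - a * (a + 1) := by rw [h]; exact hinv
          have hyub : 2 * y ≤ 2 * a + 2 := by nlinarith [h2y]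
          exact hnohit ⟨hy, by omega⟩
        · omega
      by_cases hhit : a ≤ y + v ∧ y + v ≤ b
      · rw [if_pos hhit]
        exact ⟨max ymax t, v - 1, rfl, by omega, le_max_left _ _, Or.inr rfl⟩
      · rw [if_neg hhit]
        obtain ⟨r, vf, heq, h1, h2, h3⟩ :=
          ih (y + v) (v - 1) t ymax (by omega) (by omega)
            (by ring_nf; ring_nf at hinv ⊢; omega) ht hhit (by push_cast at hfuel ⊢; omega)
        exact ⟨r, vf, heq, h1, h2, h3⟩
    · rw [if_neg hy]
      exact ⟨ymax, v, rfl, hva, le_refl _, Or.inl rfl⟩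

-- descent for the decisive start velocity sv = -a-1 on a target a ≤ b ≤ -1:
-- a hit is guaranteed (at y = a at the latest), so ymax becomes max ymax t
lemma innerA_descent_fin (a b : Int) (ha : a ≤ -2) (hb : b ≤ -1) (hab : a ≤ b) :
    ∀ (fuel : Nat) (y v t ymax : Int), v ≤ -1 → a ≤ v →
      2 * y = (-a - 1) * (-a) - v * (v + 1) → 2 * t = (-a - 1) * (-a) →
      ¬(a ≤ y ∧ y ≤ b) →
      v - a + 2 ≤ (fuel : Int) →
      ∃ vf, innerA a b fuel y v t ymax = (max ymax t, vf) ∧ a - 1 ≤ vf := by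
  intro fuel
  induction fuel with
  | zero => intro y v t ymax h1 h2 h3 h4 h5 h6; exfalso; omega
  | succ n ih =>
    intro y v t ymax hv1 hva hinv ht hnohit hfuel
    have hvsq : v * (v + 1) ≤ a * (a + 1) := by nlinarith
    have hy0 : 0 ≤ y := by nlinarith
    simp only [innerA]
    rw [if_pos (by omega : a ≤ y)]
    rw [if_neg (by omega : ¬(v - 1 = 0))]
    by_cases hhit : a ≤ y + v ∧ y + v ≤ b
    · rw [if_pos hhit]
      exact ⟨v - 1, rfl, by omega⟩
    · rw [if_neg hhit]
      have hvna : a + 1 ≤ v := by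
        rcases eq_or_lt_of_le hva with h | h
        · exfalso
          -- v = a ⇒ y = 0 ⇒ next position is exactly a : a hit
          have hy : 2 * y = 0 := by rw [← h] at hinv; nlinarith
          exact hhit ⟨by omega, by omega⟩
        · omega
      obtain ⟨vf, heq, hle⟩ :=
        ih (y + v) (v - 1) t ymax (by omega) (by omega)
          (by ring_nf; ring_nf at hinv ⊢; omega) ht hhit (by push_cast at hfuel ⊢; omega)
      exact ⟨vf, heq, hle⟩

-- descent for sv = -a (a ≤ -2, b ≤ -1): no position ever falls into the target,
-- the loop exits below it with final velocity a-2
lemma innerA_descent_over (a b : Int) (ha : a ≤ -2) (hb : b ≤ -1) :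
    ∀ (fuel : Nat) (y v t ymax : Int), v ≤ -1 → a - 1 ≤ v →
      2 * y = (-a) * (-a + 1) - v * (v + 1) →
      v - a + 3 ≤ (fuel : Int) →
      innerA a b fuel y v t ymax = (ymax, a - 2) := by
  intro fuel
  induction fuel with
  | zero => intro y v t ymax h1 h2 h3 h4; exfalso; omega
  | succ n ih =>
    intro y v t ymax hv1 hva hinv hfuel
    have hvsq : v * (v + 1) ≤ (a - 1) * a := by nlinarith
    have hy0 : 0 ≤ y := by nlinarith
    simp only [innerA]
    rw [if_pos (by omega : a ≤ y)]
    rw [if_neg (by omega : ¬(v - 1 = 0))]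
    by_cases hvlast : v = a - 1
    · -- y = 0, next position a - 1 < a : no hit, then the loop condition fails
      have hy : 2 * y = 0 := by rw [hvlast] at hinv; nlinarith
      rw [if_neg (by omega : ¬(a ≤ y + v ∧ y + v ≤ b))]
      obtain ⟨m, rfl⟩ : ∃ m, n = m + 1 := ⟨n - 1, by omega⟩
      simp only [innerA]
      rw [if_neg (by omega : ¬(a ≤ y + v))]
      congr 1
      omega
    · have hva2 : a ≤ v := by omega
      have hstep : 0 ≤ y + v := by nlinarith
      rw [if_neg (by omega : ¬(a ≤ y + v ∧ y + v ≤ b))]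
      exact ih (y + v) (v - 1) t ymax (by omega) (by omega)
        (by ring_nf; ring_nf at hinv ⊢; omega) (by push_cast at hfuel ⊢; omega)

-- descent for sv = -a-2 on the singleton target b = a (a ≤ -3): every position
-- stays at least a+1 until the probe jumps straight below the target: no hit ever
lemma innerA_descent_sing (a : Int) (ha : a ≤ -3) :
    ∀ (fuel : Nat) (y v t ymax : Int), v ≤ -1 → a ≤ v →
      2 * y = (-a - 2) * (-a - 1) - v * (v + 1) →
      v - a + 3 ≤ (fuel : Int) →
      innerA a a fuel y v t ymax = (ymax, a - 1) := by
  intro fuel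
  induction fuel with
  | zero => intro y v t ymax h1 h2 h3 h4; exfalso; omega
  | succ n ih =>
    intro y v t ymax hv1 hva hinv hfuel
    have hvsq : v * (v + 1) ≤ a * (a + 1) := by nlinarith
    have hy1 : a + 1 ≤ y := by nlinarith
    simp only [innerA]
    rw [if_pos (by omega : a ≤ y)]
    rw [if_neg (by omega : ¬(v - 1 = 0))]
    by_cases hvlast : v = a
    · -- y = a + 1, next position 2a+1 < a : no hit, loop condition fails
      have hy : 2 * y = 2 * a + 2 := by rw [hvlast] at hinv; nlinarith
      rw [if_neg (by omega : ¬(a ≤ y + v ∧ y + v ≤ a))]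
      obtain ⟨m, rfl⟩ : ∃ m, n = m + 1 := ⟨n - 1, by omega⟩
      simp only [innerA]
      rw [if_neg (by omega : ¬(a ≤ y + v))]
      congr 1
      omega
    · have hva2 : a + 1 ≤ v := by omega
      have hstep : a + 1 ≤ y + v := by nlinarith
      rw [if_neg (by omega : ¬(a ≤ y + v ∧ y + v ≤ a))]
      exact ih (y + v) (v - 1) t ymax (by omega) (by omega)
        (by ring_nf; ring_nf at hinv ⊢; omega) (by push_cast at hfuel ⊢; omega)

-- global bound: whatever happens, ymax never exceeds max ymax T(sv)
lemma innerA_le (a b sv : Int) (hsv : 1 ≤ sv) :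
    ∀ (fuel : Nat) (y v t ymax : Int), 0 ≤ ymax →
      ((1 ≤ v ∧ v ≤ sv ∧ t = 0) ∨ (v ≤ 0 ∧ 2 * t = sv * (sv + 1))) →
      2 * y = sv * (sv + 1) - v * (v + 1) →
      ∃ r vf, innerA a b fuel y v t ymax = (r, vf) ∧ ymax ≤ r ∧
        2 * r ≤ max (2 * ymax) (sv * (sv + 1)) := by
  intro fuel
  induction fuel with
  | zero =>
    intro y v t ymax hy0 _ _
    exact ⟨ymax, v, rfl, le_refl _, le_max_left _ _⟩
  | succ n ih =>
    intro y v t ymax hy0 hphase hinv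
    have hS : 0 ≤ sv * (sv + 1) := by nlinarith
    simp only [innerA]
    by_cases hy : a ≤ y
    · rw [if_pos hy]
      by_cases hv0 : v - 1 = 0
      · rw [if_pos hv0]
        have hv1 : v = 1 := by omega
        have ht2 : 2 * (y + v) = sv * (sv + 1) := by rw [hv1] at hinv ⊢; omega
        exact ih (y + v) (v - 1) (y + v) ymax hy0 (Or.inr ⟨by omega, ht2⟩)
          (by ring_nf; ring_nf at hinv ⊢; omega)
      · rw [if_neg hv0]
        by_cases hhit : a ≤ y + v ∧ y + v ≤ b
        · rw [if_pos hhit]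
          refine ⟨max ymax t, v - 1, rfl, le_max_left _ _, ?_⟩
          rcases hphase with ⟨_, _, ht⟩ | ⟨_, ht⟩
          · rw [ht]; simp; omega
          · have : 2 * max ymax t = max (2 * ymax) (2 * t) := by
              rcases le_total ymax t with h | h
              · rw [max_eq_right h, max_eq_right (by omega)]
              · rw [max_eq_left h, max_eq_left (by omega)]
            omega
        · rw [if_neg hhit]
          have hphase' : (1 ≤ v - 1 ∧ v - 1 ≤ sv ∧ t = 0) ∨ (v - 1 ≤ 0 ∧ 2 * t = sv * (sv + 1)) := by
            rcases hphase with ⟨h1, h2, h3⟩ | ⟨h1, h2⟩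
            · rcases eq_or_lt_of_le h1 with h | h
              · exact absurd (by omega : v - 1 = 0) hv0
              · exact Or.inl ⟨by omega, by omega, h3⟩
            · exact Or.inr ⟨by omega, h2⟩
          exact ih (y + v) (v - 1) t ymax hy0 hphase'
            (by ring_nf; ring_nf at hinv ⊢; omega)
    · rw [if_neg hy]
      exact ⟨ymax, v, rfl, le_refl _, le_max_left _ _⟩

-- fuel is always sufficient for the ascent/descent lemmas
lemma fuel_enough (sv a : Int) (hsv : 1 ≤ sv) (ha : a ≤ -1) :
    sv + 2 ≤ (((sv - a + 6).toNat : Nat) : Int) := by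
  rw [Int.toNat_of_nonneg (by omega)]; omega

-- the outer loop on a target a < b ≤ -1 reaches startvelocity -a-1 and returns its
-- apex T(-a-1)
lemma outerA_main (a b : Int) (hab : a < b) (hb : b ≤ -1) :
    ∀ (fuel : Nat) (sv ymax : Int), 1 ≤ sv → sv ≤ -a - 1 → 0 ≤ ymax →
      2 * ymax ≤ (-a - 1) * (-a) →
      -a + 1 - sv ≤ (fuel : Int) →
      2 * outerA a b fuel sv ymax = (-a - 1) * (-a) := by
  have ha2 : a ≤ -2 := by omega
  intro fuel
  induction fuel with
  | zero => intro sv ymax h1 h2 h3 h4 h5; exfalso; omega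
  | succ n ih =>
    intro sv ymax hsv1 hsv2 hym0 hymub hfuel
    simp only [outerA]
    obtain ⟨fuel', t, hf, ht, heq⟩ :=
      innerA_ascent a b sv (by omega) hb hsv1 (sv - a + 6).toNat 0 sv ymax
        hsv1 (le_refl sv) (by ring) (fuel_enough sv a hsv1 (by omega))
    have hf' : -1 - a + 2 ≤ (fuel' : Int) := by
      rw [Int.toNat_of_nonneg (by omega)] at hf; omega
    rcases eq_or_lt_of_le hsv2 with hlast | hmid
    · -- sv = -a - 1 : the decisive shot
      have hS : 2 * t = (-a - 1) * (-a) := by rw [hlast] at ht; linear_combination ht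
      obtain ⟨vf, heq2, hvf⟩ :=
        innerA_descent_fin a b ha2 hb (by omega) fuel' t (-1) t ymax
          (by omega) (by omega) (by rw [hS]; ring) hS
          (by have h2 : 2 ≤ (-a - 1) * (-a) := by nlinarith
              omega) hf'
      rw [heq, heq2]
      have hmax : 2 * max ymax t = (-a - 1) * (-a) := by
        have := le_max_right ymax t
        rcases le_total ymax t with h | h
        · rw [max_eq_right h]; omega
        · rw [max_eq_left h]; omega
      by_cases hstop : vf < a
      · rw [if_pos hstop]; exact hmax
      · rw [if_neg hstop]
        -- one more round at sv = -a : nothing changes, then the loop stops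
        obtain ⟨m, rfl⟩ : ∃ m, n = m + 1 := ⟨n - 1, by omega⟩
        simp only [outerA]
        obtain ⟨fuel2, t2, hf2, ht2, heq3⟩ :=
          innerA_ascent a b (sv + 1) (by omega) hb (by omega)
            (sv + 1 - a + 6).toNat 0 (sv + 1) (max ymax t)
            (by omega) (le_refl (sv + 1)) (by ring) (fuel_enough (sv + 1) a (by omega) (by omega))
        have hf2' : -1 - a + 4 ≤ (fuel2 : Int) := by
          rw [Int.toNat_of_nonneg (by omega)] at hf2; omega
        have hS2 : 2 * t2 = (-a) * (-a + 1) := by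
          rw [hlast] at ht2; linear_combination ht2
        have heq4 :=
          innerA_descent_over a b ha2 hb fuel2 t2 (-1) t2 (max ymax t)
            (by omega) (by omega) (by rw [hS2]; ring) (by omega)
        rw [heq3, heq4]
        rw [if_pos (by omega : a - 2 < a)]
        exact hmax
    · -- sv ≤ -a - 2 : keep going
      obtain ⟨r, vf, heq2, hvfa, hymr, hror⟩ :=
        innerA_descent_mid a b sv hab hb hsv1 (by omega) fuel' t (-1) t ymax
          (by omega) (by omega) (by rw [ht]; ring) ht
          (by have h2 : 2 ≤ sv * (sv + 1) := by nlinarith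
              omega) hf'
      rw [heq, heq2]
      rw [if_neg (by omega : ¬(vf < a))]
      have hrub : 2 * r ≤ (-a - 1) * (-a) := by
        have hsq : sv * (sv + 1) ≤ (-a - 1) * (-a) := by nlinarith
        rcases hror with h | h
        · omega
        · rcases le_total ymax t with h2 | h2
          · rw [h, max_eq_right h2]; omega
          · rw [h, max_eq_left h2]; omega
      exact ih (sv + 1) r (by omega) (by omega) (by omega) hrub (by push_cast at hfuel ⊢; omega)

-- the outer loop on a singleton target b = a ≤ -3 stops at startvelocity -a-2 at the
-- latest, so its result stays below T(-a-2)
lemma outerA_sing (a : Int) (ha : a ≤ -3) :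
    ∀ (fuel : Nat) (sv ymax : Int), 1 ≤ sv → sv ≤ -a - 2 → 0 ≤ ymax →
      2 * ymax ≤ (-a - 2) * (-a - 1) →
      2 * outerA a a fuel sv ymax ≤ (-a - 2) * (-a - 1) := by
  intro fuel
  induction fuel with
  | zero => intro sv ymax h1 h2 h3 h4; exact h4
  | succ n ih =>
    intro sv ymax hsv1 hsv2 hym0 hymub
    simp only [outerA]
    obtain ⟨r, vf, heq, hymr, hrub⟩ :=
      innerA_le a a sv hsv1 (sv - a + 6).toNat 0 sv 0 ymax hym0
        (Or.inl ⟨hsv1, le_refl _, rfl⟩) (by ring)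
    rw [heq]
    have hr2 : 2 * r ≤ (-a - 2) * (-a - 1) := by
      have hsq : sv * (sv + 1) ≤ (-a - 2) * (-a - 1) := by nlinarith
      have hm : max (2 * ymax) (sv * (sv + 1)) ≤ (-a - 2) * (-a - 1) := max_le (by omega) hsq
      omega
    by_cases hstop : vf < a
    · rw [if_pos hstop]; exact hr2
    · rw [if_neg hstop]
      rcases eq_or_lt_of_le hsv2 with hlast | hmid
      · -- sv = -a-2 : the inner loop in fact ends with velocity a-1 < a
        exfalso
        obtain ⟨fuel', t, hf, ht, heq2⟩ :=
          innerA_ascent a a sv (by omega) (by omega) hsv1 (sv - a + 6).toNat 0 sv ymax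
            hsv1 (le_refl sv) (by ring) (fuel_enough sv a hsv1 (by omega))
        have hf' : -1 - a + 3 ≤ (fuel' : Int) := by
          rw [Int.toNat_of_nonneg (by omega)] at hf; omega
        have hS : 2 * t = (-a - 2) * (-a - 1) := by rw [hlast] at ht; linear_combination ht
        have heq3 :=
          innerA_descent_sing a ha fuel' t (-1) t ymax
            (by omega) (by omega) (by rw [hS]; ring) (by omega)
        rw [heq2, heq3] at heq
        have : vf = a - 1 := by cases heq; rfl
        omega
      · exact ih (sv + 1) r (by omega) (by omega) (by omega) hr2

-- the two closed forms agree with the ports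
lemma main_case (a b : Int) (hab : a < b) (hb : b ≤ -1) (l : List Int) :
    optimizedmaxy (a :: b :: l) = optimizedmaxy_alt (a :: b :: l) := by
  rw [optimizedmaxy_cons, optimizedmaxy_alt_cons]
  rw [if_neg (by omega : ¬(2 ≤ a ∨ b < a))]
  have h2 : 2 * outerA a b (-a + 6).toNat 1 0 = (-a - 1) * (-a) := by
    apply outerA_main a b hab hb _ 1 0 (le_refl _) (by omega) (le_refl _)
      (by nlinarith) (by rw [Int.toNat_of_nonneg (by omega)]; omega)
  rw [floordiv_half (-a - 1) (outerA a b (-a + 6).toNat 1 0)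
    (by rw [show (-a - 1) * ((-a - 1) + 1) = (-a - 1) * (-a) from by ring]; exact h2)]

-- ===== VERDICT (by name: the statements are the Claim_ definitions above) =====
theorem optimizedmaxy_spec : Claim_unchanged_optimizedmaxy := by
  intro yt hdom hpre hnd
  obtain ⟨hlen, hne1, hcross⟩ := hpre
  match yt, hlen with
  | a :: b :: l, _ =>
    have hne1' : a ≠ 1 := by simpa using hne1
    have hcross' : ¬(a ≤ 0 ∧ 0 ≤ b) := by simpa using hcross
    by_cases ha2 : 2 ≤ a
    · rw [optimizedmaxy_cons, optimizedmaxy_alt_cons, outerA_high a b ha2,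
        if_pos (Or.inl ha2)]
    · have ha0 : a ≤ 0 := by
        rcases lt_trichotomy a 1 with h | h | h
        · omega
        · exact absurd h hne1'
        · omega
      by_cases hba : b < a
      · rw [optimizedmaxy_cons, optimizedmaxy_alt_cons, outerA_nohit a b hba,
          if_pos (Or.inr hba)]
      · have hb : b ≤ -1 := by
          by_contra hcon
          exact hcross' ⟨ha0, by omega⟩
        by_cases hab : a < b
        · exact main_case a b hab hb l
        · have haeb : a = b := by omega
          have hge : -2 ≤ a := by
            by_contra h
            refine hnd ⟨by simp, ?_, ?_⟩
            · simp only [List.getD_cons_zero, List.getD_cons_succ]; omega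
            · simp only [List.getD_cons_zero]; omega
          subst haeb
          interval_cases a
          · rw [optimizedmaxy_cons, optimizedmaxy_alt_cons]; decide
          · rw [optimizedmaxy_cons, optimizedmaxy_alt_cons]; decide

theorem optimizedmaxy_changed : Claim_changed_optimizedmaxy := by
  unfold Claim_changed_optimizedmaxy; decide

theorem optimizedmaxy_tight : Claim_exact_optimizedmaxy := by
  intro yt hdom hpre hd
  obtain ⟨hlen, haeb, ha3⟩ := hd
  match yt, hlen with
  | a :: b :: l, _ =>
    have haeb' : a = b := by simpa using haeb
    have ha3' : a ≤ -3 := by simpa using ha3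
    subst haeb'
    rw [optimizedmaxy_cons, optimizedmaxy_alt_cons]
    rw [if_neg (by omega : ¬(2 ≤ a ∨ a < a))]
    have hA : 2 * outerA a a (-a + 6).toNat 1 0 ≤ (-a - 2) * (-a - 1) :=
      outerA_sing a ha3' _ 1 0 (le_refl _) (by omega) (le_refl _) (by nlinarith)
    obtain ⟨r, hr⟩ : ∃ r, 2 * r = (-a - 1) * (-a) := ⟨((-a-1)*(-a))/2, by
      have := Int.even_mul_succ_self (-a - 1)
      obtain ⟨k, hk⟩ := this
      have : (-a - 1) * (-a) = 2 * k := by ring_nf; ring_nf at hk; omega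
      omega⟩
    rw [floordiv_half (-a - 1) r
      (by rw [show (-a - 1) * ((-a - 1) + 1) = (-a - 1) * (-a) from by ring]; exact hr)]
    intro hcon
    rw [hcon] at hA
    nlinarith
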